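-- pv_equiv track=rewrite | github.com/TatiRidster/Python-HomeWorks | HW_sem4.py | check_digit_in_string
-- ===== SOURCE A (Python) =====
-- def check_digit_in_string(str_to_lookup: str) ->str:
--     result_string =''
--     char_count=0
--     digit_flag =0
--     length = len(str_to_lookup)
--     for i in range(0,length):
--         empty_char =str_to_lookup[i]
--         if empty_char==' ':
--             if digit_flag ==0:
--                 if len(result_string) !=0:
--                     result_string+=' '
--                 result_string += str_to_lookup[i-char_count:i]
--             char_count = 0
--             digit_flag = 0
--         elif is_int(str_to_lookup[i]):
--             digit_flag = 1
--         else: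
--             char_count +=1
--     return result_string
--
-- def is_int(str):
--     try:
--         int(str)
--         return True
--     except ValueError:
--         return False
--
-- str ='Мама сшила м0не штаны и7з бере9зовой кор45ы 893'
-- ===== SOURCE B (Python) =====
-- def is_int(str):
--     try:
--         int(str)
--         return True
--     except ValueError:
--         return False
--
-- def check_digit_in_string(str_to_lookup: str) -> str:
--     result_string = ''
--     for token in str_to_lookup.split(' ')[:-1]:
--         if not any(is_int(ch) for ch in token):
--             if result_string != '':
--                 result_string += ' '
--             result_string += token
--     return result_string
-- ===== Notes on version B (the rewrite author's own statement) =====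
-- stated objective: simpler
-- what changed: B tokenizes once with str.split on the space character, drops the trailing fragment (which A never emits) and keeps each token containing no int-parsing character, instead of A's per-character index loop with a char_count for slicing and a digit_flag.
import Mathlib
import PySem

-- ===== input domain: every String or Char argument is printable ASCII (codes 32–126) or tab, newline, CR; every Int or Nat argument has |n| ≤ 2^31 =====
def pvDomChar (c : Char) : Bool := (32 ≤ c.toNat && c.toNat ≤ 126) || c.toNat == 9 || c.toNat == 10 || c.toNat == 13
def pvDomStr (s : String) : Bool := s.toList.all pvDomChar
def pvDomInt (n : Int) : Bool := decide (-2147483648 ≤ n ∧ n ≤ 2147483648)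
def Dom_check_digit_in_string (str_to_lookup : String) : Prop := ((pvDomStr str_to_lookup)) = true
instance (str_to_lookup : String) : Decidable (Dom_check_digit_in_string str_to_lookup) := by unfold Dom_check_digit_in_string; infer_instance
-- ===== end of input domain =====

-- B tokenizes with split(' '), drops the trailing fragment, and filters digit-free tokens in one pass,
-- replacing A's per-character index/char_count/digit_flag slicing (objective: simpler decomposition).


-- ===== PORT A =====
-- is_int: `int(s)` succeeds / ValueError, on the one-character strings both programs pass it
def is_int (c : Char) : Bool := (PySem.Int.ofChars? [c]).isSome

-- loop body of A, one iteration of `for i in range(0, length)` (state: result_string, char_count, digit_flag)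
def astep (l : List Char) (st : List Char × Int × Int) (i : Int) : List Char × Int × Int :=
  let empty_char := PySem.List.pyGetD l i ' '
  if empty_char = ' ' then
    if st.2.2 = 0 then
      ((if PySem.List.len st.1 ≠ 0 then st.1 ++ [' '] else st.1) ++
        PySem.List.slice l (some (i - st.2.1)) (some i), 0, 0)
    else (st.1, 0, 0)
  else if is_int (PySem.List.pyGetD l i ' ') then (st.1, st.2.1, 1)
  else (st.1, st.2.1 + 1, st.2.2)

def check_digit_in_string (str_to_lookup : String) : String :=
  let l := str_to_lookup.toList
  String.ofList ((PySem.List.pyRange 0 (PySem.Str.len str_to_lookup) 1).foldl (astep l) ([], 0, 0)).1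

-- ===== PORT B =====
-- loop body of B: keep a token only if no character is an int; incremental separator
def bstep (result_string : List Char) (token : List Char) : List Char :=
  if token.any is_int = false then
    (if result_string ≠ [] then result_string ++ [' '] else result_string) ++ token
  else result_string

def check_digit_in_string_alt (str_to_lookup : String) : String :=
  -- str.split(' ') ported as the corresponding library function List.splitOn; `[:-1]` is the slice primitive
  let tokens := PySem.List.slice (str_to_lookup.toList.splitOn ' ') none (some (-1))
  String.ofList (tokens.foldl bstep [])

-- ===== PRECONDITION & SPEC =====
def Spec_check_digit_in_string (str_to_lookup : String) (out : String) : Prop := out = check_digit_in_string_alt str_to_lookup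
instance (str_to_lookup : String) (out : String) : Decidable (Spec_check_digit_in_string str_to_lookup out) := by unfold Spec_check_digit_in_string; infer_instance

-- ===== CLAIM (what is proved, stated in full; the proofs are below) =====
def Claim_equal_check_digit_in_string : Prop := ∀ (str_to_lookup : String), Dom_check_digit_in_string str_to_lookup → Spec_check_digit_in_string str_to_lookup (check_digit_in_string str_to_lookup)

-- ===== LEMMAS AND PROOFS =====

-- character-level reference machine: state (committed result, current token)
def sstep (st : List Char × List Char) (c : Char) : List Char × List Char :=
  if c = ' ' then (bstep st.1 st.2, []) else (st.1, st.2 ++ [c])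

theorem b_eq_machine (l : List Char) (res tok : List Char) :
    (((l.splitOn ' ').modifyHead (tok ++ ·)).dropLast).foldl bstep res = (l.foldl sstep (res, tok)).1 := by
  induction l generalizing res tok with
  | nil => simp [List.splitOn, List.splitOnP_nil]
  | cons c l ih =>
    obtain ⟨h, t, ht⟩ : ∃ h t, l.splitOnP (· == ' ') = h :: t := by
      rcases e : l.splitOnP (· == ' ') with _ | ⟨h, t⟩
      · exact absurd e (List.splitOnP_ne_nil _ l)
      · exact ⟨h, t, rfl⟩
    by_cases hc : c = ' '
    · subst hc
      have := ih (bstep res tok) []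
      simp only [List.splitOn, ht, List.modifyHead_cons, List.nil_append] at this
      simp [List.splitOn, List.splitOnP_cons, ht, List.dropLast_cons₂, sstep]
      exact this
    · have hpc : (c == ' ') = false := by simp [hc]
      have := ih res (tok ++ [c])
      simp only [List.splitOn, ht, List.modifyHead_cons] at this
      simp [List.splitOn, List.splitOnP_cons, hpc, ht, sstep, hc]
      simp only [List.append_assoc, List.singleton_append] at this ⊢
      exact this

theorem a_loop (l : List Char) (n : Nat) (hn : n ≤ l.length) :
    (PySem.List.pyRange 0 (n : Int) 1).foldl (astep l) ([], 0, 0)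
      = (((l.take n).foldl sstep ([], [])).1,
         (((((l.take n).foldl sstep ([], [])).2).filter (fun c => is_int c = false)).length : Int),
         if ((l.take n).foldl sstep ([], [])).2.any is_int then (1 : Int) else 0)
    ∧ ((l.take n).foldl sstep ([], [])).2 <:+ l.take n := by
  induction n with
  | zero => simp [PySem.List.pyRange_one_eq_nil]
  | succ n ih =>
    have hn' : n < l.length := hn
    obtain ⟨ihst, ihsuf⟩ := ih hn'.le
    obtain ⟨u, hu⟩ := ihsuf
    set P := (l.take n).foldl sstep ([], []) with hP
    -- split the range and the take
    have hrange : PySem.List.pyRange 0 ((n + 1 : Nat) : Int) 1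
        = PySem.List.pyRange 0 (n : Int) 1 ++ [(n : Int)] := by
      push_cast
      exact PySem.List.pyRange_one_succ_right (by positivity)
    have htake : l.take (n + 1) = l.take n ++ [l[n]] := by
      rw [List.take_add_one, List.getElem?_eq_getElem hn']
      rfl
    rw [hrange, List.foldl_append, List.foldl_cons, List.foldl_nil, ihst,
        htake, List.foldl_append, List.foldl_cons, List.foldl_nil, ← hP]
    have hget : PySem.List.pyGetD l (n : Int) ' ' = l[n] := by
      simp [PySem.List.pyGetD_natCast, List.getD_eq_getElem?_getD, List.getElem?_eq_getElem hn']
    by_cases hc : l[n] = ' '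
    · -- space step
      by_cases hany : P.2.any is_int = true
      · -- token had a digit: both drop it
        constructor
        · simp [astep, hget, hc, sstep, bstep, hany]
        · simp [sstep, hc]
      · -- digit-free token gets committed; the slice is exactly the token
        rw [Bool.not_eq_true] at hany
        have hfilter : P.2.filter (fun c => is_int c = false) = P.2 := by
          rw [List.filter_eq_self]
          intro a ha
          simp [List.any_eq_false.mp hany a ha]
        have hlentake : (l.take n).length = n := List.length_take_of_le hn'.le
        have hulen : u.length = n - P.2.length := by
          have := congrArg List.length hu
          simp [hlentake] at this
          omega
        have hcclen : P.2.length ≤ n := by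
          have := congrArg List.length hu
          simp [hlentake] at this
          omega
        have hslice : PySem.List.slice l (some ((n : Int) - (P.2.filter (fun c => is_int c = false)).length)) (some (n : Int)) = P.2 := by
          rw [hfilter]
          have hcast : (n : Int) - (P.2.length : Int) = ((n - P.2.length : Nat) : Int) := by
            omega
          rw [hcast, PySem.List.slice_natCast]
          have hdecomp : l = u ++ (P.2 ++ l.drop n) := by
            conv_lhs => rw [← List.take_append_drop n l, ← hu]
            simp [List.append_assoc]
          rw [hdecomp]
          rw [show u ++ (P.2 ++ l.drop n) = (u ++ P.2) ++ l.drop n by simp [List.append_assoc]]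
          rw [List.drop_append_of_le_length (by simp [hulen])]
          rw [show (u ++ P.2).drop (n - P.2.length) = P.2 by
            rw [← hulen, List.drop_left]]
          rw [show n - (n - P.2.length) = P.2.length by omega]
          exact List.take_left' rfl
        constructor
        · simp only [astep, hget, hc, hany, Bool.false_eq_true, if_false]
          simp only [hslice]
          simp [sstep, bstep, hany, PySem.List.len_eq, List.length_eq_zero_iff]
        · simp [sstep, hc]
    · -- non-space
      have hsstep : sstep P l[n] = (P.1, P.2 ++ [l[n]]) := by simp [sstep, hc]
      have hsuf : P.2 ++ [l[n]] <:+ l.take n ++ [l[n]] :=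
        ⟨u, by rw [← List.append_assoc, hu]⟩
      by_cases hd : is_int l[n] = true
      · refine ⟨?_, by rw [hsstep]; exact hsuf⟩
        simp [astep, hget, hc, hd, hsstep, List.filter_append, List.any_append]
      · rw [Bool.not_eq_true] at hd
        refine ⟨?_, by rw [hsstep]; exact hsuf⟩
        simp [astep, hget, hc, hd, hsstep, List.filter_append, List.any_append]

-- ===== VERDICT (by name: the statement is the Claim_ definition above) =====
theorem check_digit_in_string_spec : Claim_equal_check_digit_in_string := by
  intro s _
  unfold Spec_check_digit_in_string check_digit_in_string check_digit_in_string_alt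
  have hA := (a_loop s.toList s.toList.length le_rfl).1
  have hB : ((s.toList.splitOn ' ').dropLast).foldl bstep [] = (s.toList.foldl sstep ([], [])).1 := by
    have h0 := b_eq_machine s.toList [] []
    rcases e : s.toList.splitOn ' ' with _ | ⟨h, t⟩
    · simpa [e] using h0
    · simpa [e] using h0
  simp only [PySem.Str.len_eq, PySem.List.slice_to_neg_one]
  rw [hA]
  simp only [List.take_length]
  rw [hB]
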